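-- pv_equiv track=rewrite | github.com/JT76/Pauli_grouping_joint_measurements | JW_and_grouping.py | update_index_list
-- ===== SOURCE A (Python) =====
-- def update_index_list(index_list, basis, update_index):
--     more_index = True
--     max_range = len(basis) - update_index
--     if update_index > len(index_list):
--         more_index = False
--         return index_list, more_index
--     index_list[-update_index] += 1
--     if index_list[-update_index] > max_range:
--         index_list, more_index = update_index_list(index_list, basis, update_index + 1)
--         if update_index + 1 > len(index_list):
--             more_index = False
--             return index_list, more_index
--         index_list[-update_index] = index_list[-(update_index + 1)] + 1
--         return index_list, more_index
--     else:
--         return index_list, more_index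
-- ===== SOURCE B (Python) =====
-- def update_index_list(index_list, basis, update_index):
--     # Iterative odometer: scan upward for the level that absorbs the carry,
--     # then propagate values back down (mutates index_list in place, like A).
--     n = len(index_list)
--     i = update_index
--     more = False
--     while i <= n:
--         pos = n - i
--         index_list[pos] += 1
--         if index_list[pos] <= len(basis) - i:
--             more = True
--             break
--         i += 1
--     start = i - 1 if more else n - 1
--     for j in range(start, update_index - 1, -1):
--         index_list[n - j] = index_list[n - j - 1] + 1
--     return index_list, more
-- ===== Notes on version B (the rewrite author's own statement) =====
-- stated objective: alternative
-- what changed: Replaces A's recursion (with mutation interleaved into the unwind) by an explicit upward while-loop that finds the level absorbing the carry, followed by one downward for-loop that propagates the new values, using left-based indices instead of Python negative indexing.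
-- outside the precondition, e.g. on update_index_list([3], [1, 2, 3], 0): A returns ([6], False), B raises IndexError
import Mathlib
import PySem

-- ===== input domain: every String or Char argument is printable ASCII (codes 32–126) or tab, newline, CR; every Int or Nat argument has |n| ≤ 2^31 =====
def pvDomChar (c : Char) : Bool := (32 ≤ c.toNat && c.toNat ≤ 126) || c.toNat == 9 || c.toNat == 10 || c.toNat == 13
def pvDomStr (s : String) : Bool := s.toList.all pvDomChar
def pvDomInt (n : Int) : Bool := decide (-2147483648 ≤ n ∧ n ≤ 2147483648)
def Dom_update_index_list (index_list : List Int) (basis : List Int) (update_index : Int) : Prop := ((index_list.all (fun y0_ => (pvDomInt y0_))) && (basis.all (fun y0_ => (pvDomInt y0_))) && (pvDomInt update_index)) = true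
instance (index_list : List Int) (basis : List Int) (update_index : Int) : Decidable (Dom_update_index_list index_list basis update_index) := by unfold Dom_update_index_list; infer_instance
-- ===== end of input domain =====

-- B replaces A's recursion by an explicit carry-search loop plus a downward propagation loop
-- (same cost, plainer control flow). Both A and B mutate index_list in place in Python; the
-- equivalence proved here is about the returned (list, flag) value, which A and B also leave
-- as the final state of the argument.

-- ===== PORT A =====
-- Literal port of A's recursion; Python negative indexing l[-u] via pyGetD/pySetD (exact under
-- Pre_, which guarantees the index is in range wherever A reads/writes).
def update_index_list (index_list : List Int) (basis : List Int) (update_index : Int) : List Int × Bool :=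
  let max_range : Int := (basis.length : Int) - update_index
  if update_index > (index_list.length : Int) then (index_list, false)
  else
    let l1 := PySem.List.pySetD index_list (-update_index)
                (PySem.List.pyGetD index_list (-update_index) 0 + 1)
    if PySem.List.pyGetD l1 (-update_index) 0 > max_range then
      let r := update_index_list l1 basis (update_index + 1)
      if update_index + 1 > (r.1.length : Int) then (r.1, false)
      else
        (PySem.List.pySetD r.1 (-update_index)
          (PySem.List.pyGetD r.1 (-(update_index + 1)) 0 + 1), r.2)
    else (l1, true)
termination_by ((index_list.length : Int) + 1 - update_index).toNat
decreasing_by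
  simp only [PySem.List.length_pySetD]
  omega

-- ===== PORT B =====
-- the while loop of Source B: returns (mutated list, loop variable i at exit, more flag)
def uilWhile (l : List Int) (basis : List Int) (n : Int) (i : Int) : List Int × Int × Bool :=
  if i ≤ n then
    let pos := n - i
    let l1 := PySem.List.pySetD l pos (PySem.List.pyGetD l pos 0 + 1)
    if PySem.List.pyGetD l1 pos 0 ≤ (basis.length : Int) - i then (l1, i, true)
    else uilWhile l1 basis n (i + 1)
  else (l, i, false)
termination_by (n + 1 - i).toNat
decreasing_by omega

-- the downward for-loop of Source B: for j in range(start, u-1, -1): l[n-j] = l[n-j-1] + 1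
def uilProp (l : List Int) (n : Int) (j : Int) (u : Int) : List Int :=
  if u ≤ j then
    uilProp (PySem.List.pySetD l (n - j) (PySem.List.pyGetD l (n - j - 1) 0 + 1)) n (j - 1) u
  else l
termination_by (j + 1 - u).toNat
decreasing_by omega

def update_index_list_alt (index_list : List Int) (basis : List Int) (update_index : Int) : List Int × Bool :=
  let n : Int := (index_list.length : Int)
  let w := uilWhile index_list basis n update_index
  let start : Int := if w.2.2 then w.2.1 - 1 else n - 1
  (uilProp w.1 n start update_index, w.2.2)

-- ===== PRECONDITION & SPEC =====
-- Pre_ excludes update_index < 1: there Python's index -update_index is nonnegative, so A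
-- either raises IndexError or, via wraparound, increments an accidental front position —
-- and B's left-based index arithmetic raises IndexError on exactly those inputs.
def Pre_update_index_list (index_list : List Int) (basis : List Int) (update_index : Int) : Prop :=
  1 ≤ update_index
instance (index_list : List Int) (basis : List Int) (update_index : Int) : Decidable (Pre_update_index_list index_list basis update_index) := by unfold Pre_update_index_list; infer_instance

def pvWitness_update_index_list : List Int × List Int × Int := ([1, 2], [5, 6, 7], 1)

def Spec_update_index_list (index_list : List Int) (basis : List Int) (update_index : Int) (out : List Int × Bool) : Prop := out = update_index_list_alt index_list basis update_index
instance (index_list : List Int) (basis : List Int) (update_index : Int) (out : List Int × Bool) : Decidable (Spec_update_index_list index_list basis update_index out) := by unfold Spec_update_index_list; infer_instance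

-- ===== CLAIM (what is proved, stated in full; the proofs are below) =====
def Claim_equal_update_index_list : Prop := ∀ (index_list : List Int) (basis : List Int) (update_index : Int), Dom_update_index_list index_list basis update_index → Pre_update_index_list index_list basis update_index → Spec_update_index_list index_list basis update_index (update_index_list index_list basis update_index)

-- ===== LEMMAS AND PROOFS =====

theorem uilWhile_length (l basis : List Int) (n i : Int) :
    (uilWhile l basis n i).1.length = l.length := by
  fun_induction uilWhile l basis n i with
  | case1 => exact PySem.List.length_pySetD ..
  | case2 => rename_i ih; rw [ih]; exact PySem.List.length_pySetD ..
  | case3 => rfl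

theorem uilProp_length (l : List Int) (n j u : Int) :
    (uilProp l n j u).length = l.length := by
  fun_induction uilProp l n j u with
  | case1 => rename_i ih; rw [ih]; exact PySem.List.length_pySetD ..
  | case2 => rfl

theorem uilWhile_exit_ge (l basis : List Int) (n i : Int) :
    i ≤ (uilWhile l basis n i).2.1 := by
  fun_induction uilWhile l basis n i with
  | case1 => simp
  | case2 => rename_i ih; omega
  | case3 => simp

-- zeta-free one-step unfoldings of the ports (the definitions use let-bindings)
theorem updA_eq (l basis : List Int) (u : Int) :
    update_index_list l basis u =
      if u > (l.length : Int) then (l, false)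
      else
        if PySem.List.pyGetD (PySem.List.pySetD l (-u) (PySem.List.pyGetD l (-u) 0 + 1)) (-u) 0 >
            (basis.length : Int) - u then
          if u + 1 > (((update_index_list (PySem.List.pySetD l (-u) (PySem.List.pyGetD l (-u) 0 + 1)) basis (u + 1)).1.length : Int)) then
            ((update_index_list (PySem.List.pySetD l (-u) (PySem.List.pyGetD l (-u) 0 + 1)) basis (u + 1)).1, false)
          else
            (PySem.List.pySetD (update_index_list (PySem.List.pySetD l (-u) (PySem.List.pyGetD l (-u) 0 + 1)) basis (u + 1)).1 (-u)
              (PySem.List.pyGetD (update_index_list (PySem.List.pySetD l (-u) (PySem.List.pyGetD l (-u) 0 + 1)) basis (u + 1)).1 (-(u + 1)) 0 + 1),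
             (update_index_list (PySem.List.pySetD l (-u) (PySem.List.pyGetD l (-u) 0 + 1)) basis (u + 1)).2)
        else (PySem.List.pySetD l (-u) (PySem.List.pyGetD l (-u) 0 + 1), true) := by
  rw [update_index_list]

theorem updB_eq (l basis : List Int) (u : Int) :
    update_index_list_alt l basis u =
      (uilProp (uilWhile l basis (l.length : Int) u).1 (l.length : Int)
        (if (uilWhile l basis (l.length : Int) u).2.2 then (uilWhile l basis (l.length : Int) u).2.1 - 1
         else (l.length : Int) - 1) u,
       (uilWhile l basis (l.length : Int) u).2.2) := by
  rw [update_index_list_alt]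

theorem uilWhile_eq (l basis : List Int) (n i : Int) :
    uilWhile l basis n i =
      if i ≤ n then
        if PySem.List.pyGetD (PySem.List.pySetD l (n - i) (PySem.List.pyGetD l (n - i) 0 + 1)) (n - i) 0 ≤
            (basis.length : Int) - i then
          (PySem.List.pySetD l (n - i) (PySem.List.pyGetD l (n - i) 0 + 1), i, true)
        else uilWhile (PySem.List.pySetD l (n - i) (PySem.List.pyGetD l (n - i) 0 + 1)) basis n (i + 1)
      else (l, i, false) := by
  rw [uilWhile]

theorem uilProp_stop (l : List Int) (n j u : Int) (h : j < u) : uilProp l n j u = l := by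
  rw [uilProp, if_neg (by omega)]

-- bridge: Python's negative index -u equals the left-based index len-u (1 ≤ u ≤ len)
theorem uil_idx_neg (n : Nat) (u : Int) (h1 : 1 ≤ u) (h2 : u ≤ (n : Int)) :
    PySem.List.pyIdx? n (-u) = PySem.List.pyIdx? n ((n : Int) - u) := by
  simp only [PySem.List.pyIdx?]
  split_ifs <;> first | rfl | omega | (congr 1; omega)

theorem uil_getD_neg (xs : List Int) (u : Int) (d : Int) (h1 : 1 ≤ u) (h2 : u ≤ (xs.length : Int)) :
    PySem.List.pyGetD xs (-u) d = PySem.List.pyGetD xs ((xs.length : Int) - u) d := by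
  simp only [PySem.List.pyGetD, PySem.List.pyGet?, uil_idx_neg xs.length u h1 h2]

theorem uil_setD_neg (xs : List Int) (u : Int) (v : Int) (h1 : 1 ≤ u) (h2 : u ≤ (xs.length : Int)) :
    PySem.List.pySetD xs (-u) v = PySem.List.pySetD xs ((xs.length : Int) - u) v := by
  simp only [PySem.List.pySetD, PySem.List.pySet?, uil_idx_neg xs.length u h1 h2]

-- peeling the LAST iteration (j = u) off the downward propagation loop
theorem uilProp_last (l : List Int) (n j u : Int) (h : u ≤ j) :
    uilProp l n j u =
      PySem.List.pySetD (uilProp l n j (u + 1)) (n - u)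
        (PySem.List.pyGetD (uilProp l n j (u + 1)) (n - u - 1) 0 + 1) := by
  by_cases hj : u + 1 ≤ j
  · have hstep : uilProp l n j (u + 1) =
        uilProp (PySem.List.pySetD l (n - j) (PySem.List.pyGetD l (n - j - 1) 0 + 1)) n (j - 1) (u + 1) := by
      rw [uilProp, if_pos hj]
    rw [hstep, uilProp, if_pos h]
    exact uilProp_last _ n (j - 1) u (by omega)
  · have hju : j = u := by omega
    subst hju
    rw [uilProp_stop l n j (j + 1) (by omega), uilProp, if_pos h,
       uilProp_stop _ n (j - 1) j (by omega)]
termination_by (j - u).toNat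
decreasing_by omega

-- the core correspondence: A's recursion computes B's loop-then-propagate result
theorem uil_main (l basis : List Int) (u : Int) (hu : 1 ≤ u) :
    update_index_list l basis u = update_index_list_alt l basis u := by
  rw [updA_eq, updB_eq]
  by_cases h1 : u > (l.length : Int)
  · have hw : uilWhile l basis (l.length : Int) u = (l, u, false) := by
      rw [uilWhile_eq, if_neg (by omega)]
    rw [if_pos h1, hw]
    simp only [Bool.false_eq_true, if_false]
    rw [uilProp_stop l _ _ u (by omega)]
  · rw [if_neg h1]
    have hun : u ≤ (l.length : Int) := by omega
    rw [uil_setD_neg l u _ hu hun, uil_getD_neg l u 0 hu hun]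
    set l1 := PySem.List.pySetD l ((l.length : Int) - u) (PySem.List.pyGetD l ((l.length : Int) - u) 0 + 1) with hl1
    have hlen1 : l1.length = l.length := PySem.List.length_pySetD ..
    rw [uil_getD_neg l1 u 0 hu (by omega), hlen1]
    have hWu : uilWhile l basis (l.length : Int) u =
        if PySem.List.pyGetD l1 ((l.length : Int) - u) 0 ≤ (basis.length : Int) - u then (l1, u, true)
        else uilWhile l1 basis (l.length : Int) (u + 1) := by
      rw [uilWhile_eq, if_pos hun, hl1]
    by_cases h2 : PySem.List.pyGetD l1 ((l.length : Int) - u) 0 > (basis.length : Int) - u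
    · rw [if_pos h2]
      rw [if_neg (by omega)] at hWu
      -- overflow: A recurses; rewrite the recursive call through the IH
      have hIH := uil_main l1 basis (u + 1) (by omega)
      rw [updB_eq] at hIH
      rw [hIH, hWu, hlen1]
      set w := uilWhile l1 basis (l.length : Int) (u + 1) with hw
      have hwlen : w.1.length = l.length := by rw [hw, uilWhile_length]; exact hlen1
      have hwge : u + 1 ≤ w.2.1 := by rw [hw]; exact uilWhile_exit_ge ..
      set s : Int := if w.2.2 then w.2.1 - 1 else (l.length : Int) - 1 with hs
      set r1 := uilProp w.1 (l.length : Int) s (u + 1) with hr1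
      have hrlen : r1.length = l.length := by rw [hr1, uilProp_length]; exact hwlen
      by_cases h3 : u + 1 > ((r1.length : Int))
      · -- u = len(l): the carry ran off at once; no propagation on either side
        rw [if_pos h3]
        have hw' : w = (l1, u + 1, false) := by rw [hw, uilWhile_eq, if_neg (by omega)]
        have hs' : s = (l.length : Int) - 1 := by rw [hs, hw']; simp
        have hr' : r1 = l1 := by
          rw [hr1, hs', hw', uilProp_stop _ _ _ _ (by omega)]
        rw [hr', hs', hw', uilProp_stop _ _ _ _ (by omega)]
      · rw [if_neg h3]
        rw [hrlen] at h3
        have hsu : u ≤ s := by rw [hs]; split <;> omega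
        rw [uil_setD_neg r1 u _ hu (by omega), uil_getD_neg r1 (u + 1) 0 (by omega) (by omega), hrlen]
        have hidx : ((l.length : Int) - (u + 1)) = (l.length : Int) - u - 1 := by ring
        rw [hidx, hr1, ← uilProp_last w.1 (l.length : Int) s u hsu]
    · rw [if_neg h2]
      rw [if_pos (by omega)] at hWu
      rw [hWu]
      simp only [if_true]
      rw [uilProp_stop _ _ _ _ (by omega)]
termination_by ((l.length : Int) + 1 - u).toNat
decreasing_by simp only [PySem.List.length_pySetD]; omega

-- ===== VERDICT (by name: the statement is the Claim_ definition above) =====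
theorem update_index_list_spec : Claim_equal_update_index_list := by
  intro l basis u _ hu
  exact uil_main l basis u hu
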